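-- pv_equiv track=rewrite | github.com/PossiblyMaybe/AdventOfCode2024 | Day2.py | is_safe2
-- ===== SOURCE A (Python) =====
-- def is_safe(levels: list):
--     new = []
--     bad_level_count = 0
--     for i in range(1, len(levels)):
--         new.append(levels[i] - levels[i - 1])
--     if max(new) > 0 > min(new):
--         return False
--     new = list(map(abs, new))
--     if max(new) > 3:
--         return False
--     if min(new) < 1:
--         return False
--     return True
--
-- def is_safe2(levels: list):
--     if is_safe(levels):
--         return True
--     safe = False
--     for i in range(len(levels) - 1):
--         if is_safe(levels[:i] + levels[i + 1:]):
--             safe = True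
--     if is_safe(levels[:-1]):
--         safe = True
--     return safe
-- ===== SOURCE B (Python) =====
-- # Single-pass re-implementation: compute the step list once, and for each of the
-- # two allowed directions locate the first out-of-range step; only removing one of
-- # the two levels adjacent to it can help, so at most two O(n) re-checks per
-- # direction are needed -> O(n) total instead of A's O(n^2).
--
-- def is_safe2(levels: list):
--     diffs = [b - a for a, b in zip(levels, levels[1:])]
--     return _tolerant(diffs, 1, 3) or _tolerant(diffs, -3, -1)
--
-- def _tolerant(diffs, lo, hi):
--     bad = _first_bad(diffs, lo, hi)
--     if bad is None:
--         return True
--     return _ok_without_level(diffs, bad, lo, hi) or _ok_without_level(diffs, bad + 1, lo, hi)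
--
-- def _ok_without_level(diffs, k, lo, hi):
--     # step list of the level sequence with level k removed
--     if k == 0:
--         rest = diffs[1:]
--     elif k == len(diffs):
--         rest = diffs[:-1]
--     else:
--         rest = diffs[:k - 1] + [diffs[k - 1] + diffs[k]] + diffs[k + 1:]
--     return _first_bad(rest, lo, hi) is None
--
-- def _first_bad(diffs, lo, hi):
--     for j, x in enumerate(diffs):
--         if not (lo <= x <= hi):
--             return j
--     return None
-- ===== Notes on version B (the rewrite author's own statement) =====
-- stated objective: faster
-- what changed: Instead of re-running the full safety check on every one-element-removed copy of the list, B computes the step list once and, per direction, locates the first out-of-range step and re-checks only the two removals adjacent to it (any other removal keeps that bad step).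
-- crash fix: A raises ValueError (max()/min() of an empty sequence) on lists of fewer than 2 levels and on 2-level lists whose single step is unsafe; B returns True there, since removing one level always leaves a trivially safe sequence. — e.g. on is_safe2([1, 9]): A raises ValueError, B returns true
import Mathlib
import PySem

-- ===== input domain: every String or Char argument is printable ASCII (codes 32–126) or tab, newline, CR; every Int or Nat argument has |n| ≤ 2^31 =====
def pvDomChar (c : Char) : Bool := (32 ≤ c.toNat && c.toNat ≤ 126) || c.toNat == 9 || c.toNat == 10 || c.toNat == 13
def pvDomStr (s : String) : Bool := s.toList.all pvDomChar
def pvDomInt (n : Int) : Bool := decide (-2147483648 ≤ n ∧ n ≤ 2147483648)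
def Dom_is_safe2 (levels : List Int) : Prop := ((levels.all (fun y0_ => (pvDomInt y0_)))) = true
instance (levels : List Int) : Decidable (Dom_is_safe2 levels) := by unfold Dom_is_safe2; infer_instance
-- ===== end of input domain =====

-- B replaces A's try-every-removal rescan by one pass per direction: find the
-- first out-of-range step and re-check only the two removals adjacent to it.

-- ===== PORT A =====
-- the 'new' diff list built by A's first loop
def pyDiffsA (xs : List Int) : List Int :=
  (PySem.List.pyRange 1 (PySem.List.len xs) 1).foldl
    (fun acc i => acc ++ [PySem.List.pyGetD xs i 0 - PySem.List.pyGetD xs (i - 1) 0]) []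

-- A's is_safe; none = Python ValueError (max/min of an empty diff list)
def is_safeA (xs : List Int) : Option Bool :=
  let new := pyDiffsA xs
  match PySem.List.max? new (fun x => x), PySem.List.min? new (fun x => x) with
  | some mx, some mn =>
    if mx > 0 ∧ 0 > mn then some false
    else
      let new2 := new.map (fun x => |x|)
      match PySem.List.max? new2 (fun x => x), PySem.List.min? new2 (fun x => x) with
      | some mx2, some mn2 =>
        if mx2 > 3 then some false
        else if mn2 < 1 then some false
        else some true
      | _, _ => none
  | _, _ => none

-- On inputs satisfying Pre_ every is_safe call below returns a value (never none);
-- where Python would raise (only outside Pre_) the port's value is arbitrary.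
def is_safe2 (levels : List Int) : Bool :=
  if is_safeA levels == some true then true
  else
    let safe := (PySem.List.pyRange 0 (PySem.List.len levels - 1) 1).foldl
      (fun safe i =>
        if is_safeA (PySem.List.slice levels none (some i) ++
                     PySem.List.slice levels (some (i + 1)) none) == some true
        then true else safe) false
    if is_safeA (PySem.List.slice levels none (some (-1))) == some true then true else safe

-- ===== PORT B =====
-- zip(levels, levels[1:]) diffs; levels[1:] = drop 1 (exact)
def diffsB (levels : List Int) : List Int :=
  List.zipWith (fun a b => b - a) levels (levels.drop 1)

-- _first_bad: index of the first step outside [lo, hi]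
def firstBad (lo hi : Int) : List Int → Option Nat
  | [] => none
  | x :: t => if lo ≤ x ∧ x ≤ hi then (firstBad lo hi t).map (· + 1) else some 0

-- _ok_without_level: diffs[1:] = drop 1, diffs[:-1] = dropLast, the middle slices
-- are take/drop (exact on the natural indices used here)
def okWithoutLevel (d : List Int) (k : Nat) (lo hi : Int) : Bool :=
  let rest :=
    if k = 0 then d.drop 1
    else if k = d.length then d.dropLast
    else d.take (k - 1) ++ [d.getD (k - 1) 0 + d.getD k 0] ++ d.drop (k + 1)
  firstBad lo hi rest == none

-- _tolerant
def tolerantB (d : List Int) (lo hi : Int) : Bool :=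
  match firstBad lo hi d with
  | none => true
  | some i => okWithoutLevel d i lo hi || okWithoutLevel d (i + 1) lo hi

def is_safe2_alt (levels : List Int) : Bool :=
  tolerantB (diffsB levels) 1 3 || tolerantB (diffsB levels) (-3) (-1)

-- ===== PRECONDITION & SPEC =====
-- Pre_ excludes exactly the inputs where A raises ValueError (max()/min() of an empty
-- diff list): lists of fewer than 2 levels, and 2-level lists whose single step is
-- unsafe (there A recurses on a 1-level list).
def Pre_is_safe2 (levels : List Int) : Prop :=
  3 ≤ levels.length ∨
  (levels.length = 2 ∧ 1 ≤ |levels.getD 1 0 - levels.getD 0 0| ∧ |levels.getD 1 0 - levels.getD 0 0| ≤ 3)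
instance (levels : List Int) : Decidable (Pre_is_safe2 levels) := by unfold Pre_is_safe2; infer_instance

def pvWitness_is_safe2 : List Int := [1, 2, 4]

-- A raises ValueError on lists of fewer than 2 levels and on 2-level lists whose single
-- step is unsafe; B returns True there (removing one level always leaves a safe sequence).
def Raises_is_safe2 (levels : List Int) : Prop :=
  levels.length ≤ 1 ∨
  (levels.length = 2 ∧ ¬(1 ≤ |levels.getD 1 0 - levels.getD 0 0| ∧ |levels.getD 1 0 - levels.getD 0 0| ≤ 3))
instance (levels : List Int) : Decidable (Raises_is_safe2 levels) := by unfold Raises_is_safe2; infer_instance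

def pvRaiseWitness_is_safe2 : List Int := [1, 9]
def pvRaiseWitnessOut_is_safe2 : Bool := true

def Spec_is_safe2 (levels : List Int) (out : Bool) : Prop := out = is_safe2_alt levels
instance (levels : List Int) (out : Bool) : Decidable (Spec_is_safe2 levels out) := by unfold Spec_is_safe2; infer_instance

-- ===== CLAIM (what is proved, stated in full; the proofs are below) =====
def Claim_equal_is_safe2 : Prop := ∀ (levels : List Int), Dom_is_safe2 levels → Pre_is_safe2 levels → Spec_is_safe2 levels (is_safe2 levels)
def Claim_raises_is_safe2 : Prop := (∀ (levels : List Int), Dom_is_safe2 levels → Raises_is_safe2 levels → ¬ Pre_is_safe2 levels) ∧ (Dom_is_safe2 (pvRaiseWitness_is_safe2) ∧ Raises_is_safe2 (pvRaiseWitness_is_safe2) ∧ is_safe2_alt (pvRaiseWitness_is_safe2) = pvRaiseWitnessOut_is_safe2)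

-- ===== LEMMAS AND PROOFS =====

-- proof-only helpers
def allP (lo hi : Int) (d : List Int) : Bool := d.all fun x => decide (lo ≤ x ∧ x ≤ hi)

-- the level list with level k removed
def rmv (xs : List Int) (k : Nat) : List Int := xs.take k ++ xs.drop (k + 1)

-- the diff list okWithoutLevel checks
def restOf (d : List Int) (k : Nat) : List Int :=
  if k = 0 then d.drop 1
  else if k = d.length then d.dropLast
  else d.take (k - 1) ++ [d.getD (k - 1) 0 + d.getD k 0] ++ d.drop (k + 1)

theorem okWithoutLevel_eq (d : List Int) (k : Nat) (lo hi : Int) :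
    okWithoutLevel d k lo hi = (firstBad lo hi (restOf d k) == none) := rfl

theorem length_diffsB (xs : List Int) : (diffsB xs).length = xs.length - 1 := by
  simp [diffsB]

theorem getElem_diffsB (xs : List Int) (j : Nat)
    (h' : j < (diffsB xs).length) :
    (diffsB xs)[j] = xs[j + 1]'(by simp [diffsB] at h'; omega) - xs[j]'(by simp [diffsB] at h'; omega) := by
  simp [diffsB]

theorem pyDiffsA_eq (xs : List Int) : pyDiffsA xs = diffsB xs := by
  unfold pyDiffsA
  rw [PySem.List.foldl_append_singleton_eq_map]
  apply List.ext_getElem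
  · simp [PySem.List.length_pyRange_one, diffsB]
  · intro k h1 h2
    simp only [List.nil_append, List.getElem_map, PySem.List.getElem_pyRange_one]
    have hlen : k + 1 < xs.length := by
      simp [PySem.List.length_pyRange_one] at h1; omega
    have hk : (1 : Int) + k = ((k + 1 : Nat) : Int) := by push_cast; ring
    have hk2 : (1 : Int) + k - 1 = ((k : Nat) : Int) := by ring
    rw [hk2, hk]
    simp only [PySem.List.pyGetD_natCast]
    simp [diffsB, List.getD_eq_getElem?_getD, List.getElem?_eq_getElem hlen,
      List.getElem?_eq_getElem (by omega : k < xs.length)]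

theorem firstBad_eq_none_iff (lo hi : Int) (d : List Int) :
    firstBad lo hi d = none ↔ allP lo hi d = true := by
  induction d with
  | nil => simp [firstBad, allP]
  | cons x t ih =>
    simp only [firstBad, allP, List.all_cons]
    by_cases h : lo ≤ x ∧ x ≤ hi
    · simp only [if_pos h, Option.map_eq_none_iff, ih, allP]; simp [h]
    · simp [h]

theorem firstBad_eq_some (lo hi : Int) (d : List Int) (i : Nat)
    (h : firstBad lo hi d = some i) : ∃ h' : i < d.length, ¬(lo ≤ d[i] ∧ d[i] ≤ hi) := by
  induction d generalizing i with
  | nil => simp [firstBad] at h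
  | cons x t ih =>
    simp only [firstBad] at h
    by_cases hx : lo ≤ x ∧ x ≤ hi
    · simp only [if_pos hx, Option.map_eq_some_iff] at h
      obtain ⟨j, hj, rfl⟩ := h
      obtain ⟨hlt, hbad⟩ := ih j hj
      exact ⟨by simpa using Nat.succ_lt_succ hlt, by simpa using hbad⟩
    · simp only [if_neg hx, Option.some_inj] at h
      subst h
      exact ⟨by simp, by simpa using hx⟩

theorem safeA_char (xs : List Int) (h : 2 ≤ xs.length) :
    is_safeA xs = some (allP 1 3 (diffsB xs) || allP (-3) (-1) (diffsB xs)) := by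
  have hlen : (diffsB xs).length = xs.length - 1 := by simp [diffsB]
  unfold is_safeA
  rw [pyDiffsA_eq]
  rcases hd : diffsB xs with _ | ⟨y, t⟩
  · rw [hd] at hlen; simp at hlen; omega
  simp only [PySem.List.max?_id_cons, PySem.List.min?_id_cons, List.map_cons]
  have hmaxmem : t.foldl max y ∈ y :: t := PySem.List.max?_mem (PySem.List.max?_id_cons ..)
  have hminmem : t.foldl min y ∈ y :: t := PySem.List.min?_mem (PySem.List.min?_id_cons ..)
  have hmax : ∀ z ∈ y :: t, z ≤ t.foldl max y := PySem.List.max?_isMax (PySem.List.max?_id_cons ..)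
  have hmin : ∀ z ∈ y :: t, t.foldl min y ≤ z := PySem.List.min?_isMin (PySem.List.min?_id_cons ..)
  have hmaxa : ∀ z ∈ y :: t, |z| ≤ (t.map (fun x => |x|)).foldl max |y| := by
    intro z hz
    have := PySem.List.max?_isMax (PySem.List.max?_id_cons (x := |y|) (t := t.map (fun x => |x|)))
    have hmem : |z| ∈ |y| :: t.map (fun x => |x|) := by
      rcases hz with _ | hz
      · simp
      · exact List.mem_cons_of_mem _ (List.mem_map_of_mem (by assumption))
    exact this _ hmem
  have hmina : ∀ z ∈ y :: t, (t.map (fun x => |x|)).foldl min |y| ≤ |z| := by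
    intro z hz
    have := PySem.List.min?_isMin (PySem.List.min?_id_cons (x := |y|) (t := t.map (fun x => |x|)))
    have hmem : |z| ∈ |y| :: t.map (fun x => |x|) := by
      rcases hz with _ | hz
      · simp
      · exact List.mem_cons_of_mem _ (List.mem_map_of_mem (by assumption))
    exact this _ hmem
  have hmaxamem : (t.map (fun x => |x|)).foldl max |y| ∈ |y| :: t.map (fun x => |x|) :=
    PySem.List.max?_mem (PySem.List.max?_id_cons ..)
  have hminamem : (t.map (fun x => |x|)).foldl min |y| ∈ |y| :: t.map (fun x => |x|) :=
    PySem.List.min?_mem (PySem.List.min?_id_cons ..)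
  have habs : ∃ z ∈ y :: t, |z| = (t.map (fun x => |x|)).foldl max |y| := by
    rcases List.mem_cons.1 hmaxamem with he | he
    · exact ⟨y, by simp, he.symm⟩
    · obtain ⟨z, hz, hze⟩ := List.mem_map.1 he
      exact ⟨z, List.mem_cons_of_mem _ hz, hze⟩
  have habsmin : ∃ z ∈ y :: t, |z| = (t.map (fun x => |x|)).foldl min |y| := by
    rcases List.mem_cons.1 hminamem with he | he
    · exact ⟨y, by simp, he.symm⟩
    · obtain ⟨z, hz, hze⟩ := List.mem_map.1 he
      exact ⟨z, List.mem_cons_of_mem _ hz, hze⟩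
  have hall : ∀ lo hi : Int, (allP lo hi (y :: t) = true) ↔ ∀ z ∈ y :: t, lo ≤ z ∧ z ≤ hi := by
    intro lo hi; simp [allP]
  split_ifs with h1 h2 h3
  · congr 1
    symm
    rw [Bool.or_eq_false_iff]
    constructor
    · rw [Bool.eq_false_iff, Ne, hall]
      intro hup
      have := (hup _ hminmem).1
      omega
    · rw [Bool.eq_false_iff, Ne, hall]
      intro hdn
      have := (hdn _ hmaxmem).2
      omega
  · congr 1
    symm
    obtain ⟨z, hz, hze⟩ := habs
    rw [Bool.or_eq_false_iff]
    constructor <;> rw [Bool.eq_false_iff, Ne, hall] <;> intro hok <;>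
      have := hok _ hz <;> rcases abs_cases z with ⟨e1, e2⟩ | ⟨e1, e2⟩ <;> omega
  · congr 1
    symm
    obtain ⟨z, hz, hze⟩ := habsmin
    rw [Bool.or_eq_false_iff]
    constructor <;> rw [Bool.eq_false_iff, Ne, hall] <;> intro hok <;>
      have := hok _ hz <;> rcases abs_cases z with ⟨e1, e2⟩ | ⟨e1, e2⟩ <;> omega
  · congr 1
    symm
    rw [Bool.or_eq_true]
    rcases (by omega : 0 ≤ t.foldl min y ∨ t.foldl max y ≤ 0) with hc | hc
    · left
      rw [hall]
      intro z hz
      have l1 := hmin _ hz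
      have l2 := hmaxa _ hz
      have l3 := hmina _ hz
      rcases abs_cases z with ⟨e1, e2⟩ | ⟨e1, e2⟩ <;> omega
    · right
      rw [hall]
      intro z hz
      have l1 := hmax _ hz
      have l2 := hmaxa _ hz
      have l3 := hmina _ hz
      rcases abs_cases z with ⟨e1, e2⟩ | ⟨e1, e2⟩ <;> omega

theorem length_rmv (xs : List Int) (k : Nat) (hk : k < xs.length) :
    (rmv xs k).length = xs.length - 1 := by
  simp [rmv]; omega

theorem getElem_rmv (xs : List Int) (k j : Nat) (hk : k < xs.length)
    (hj : j < (rmv xs k).length) :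
    (rmv xs k)[j] = if h : j < k then xs[j]'(by omega) else xs[j + 1]'(by rw [length_rmv xs k hk] at hj; omega) := by
  have hl := length_rmv xs k hk
  unfold rmv
  by_cases h : j < k
  · rw [dif_pos h, List.getElem_append_left (by simp; omega)]
    simp [List.getElem_take]
  · rw [dif_neg h, List.getElem_append_right (by simp; omega)]
    rw [List.getElem_drop]
    congr 1
    simp
    omega

theorem diffsB_rmv (xs : List Int) (k : Nat) (h2 : 2 ≤ xs.length) (hk : k < xs.length) :
    diffsB (rmv xs k) = restOf (diffsB xs) k := by
  have hld : (diffsB xs).length = xs.length - 1 := length_diffsB xs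
  have hlr := length_rmv xs k hk
  unfold restOf
  by_cases hk0 : k = 0
  · subst hk0
    rw [if_pos rfl]
    have : rmv xs 0 = xs.drop 1 := by simp [rmv]
    rw [this]
    simp only [diffsB, List.drop_zipWith, List.drop_drop]
  · rw [if_neg hk0]
    by_cases hkm : k = (diffsB xs).length
    · rw [if_pos hkm]
      apply List.ext_getElem
      · simp [length_diffsB, hlr, List.length_dropLast]
      · intro j hj1 hj2
        rw [List.getElem_dropLast, getElem_diffsB _ _ hj1, getElem_diffsB]
        have hjk : j + 1 < k := by
          rw [length_diffsB, hlr] at hj1; omega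
        rw [getElem_rmv xs k (j+1) hk (by omega), getElem_rmv xs k j hk (by omega)]
        rw [dif_pos hjk, dif_pos (by omega)]
    · rw [if_neg hkm]
      apply List.ext_getElem
      · simp [length_diffsB, hlr, hld]
        omega
      · intro j hj1 hj2
        have hm : 0 < k ∧ k < (diffsB xs).length := ⟨by omega, by omega⟩
        have hn3 : 3 ≤ xs.length := by omega
        have hjlen : j < xs.length - 2 := by rw [length_diffsB, hlr] at hj1; omega
        rw [getElem_diffsB _ _ hj1,
          getElem_rmv xs k (j+1) hk (by omega), getElem_rmv xs k j hk (by omega)]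
        have hgd1 : (diffsB xs).getD (k-1) 0 = xs[k]'(by omega) - xs[k-1]'(by omega) := by
          rw [List.getD_eq_getElem?_getD, List.getElem?_eq_getElem (by omega : k - 1 < (diffsB xs).length)]
          simp only [Option.getD_some, getElem_diffsB]
          congr 2
          omega
        have hgd2 : (diffsB xs).getD k 0 = xs[k+1]'(by omega) - xs[k]'(by omega) := by
          rw [List.getD_eq_getElem?_getD, List.getElem?_eq_getElem (by omega : k < (diffsB xs).length)]
          simp only [Option.getD_some, getElem_diffsB]
        rcases (by omega : j < k - 1 ∨ j = k - 1 ∨ k ≤ j) with hc | hc | hc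
        · rw [dif_pos (by omega), dif_pos (by omega)]
          rw [List.getElem_append_left (by rw [List.length_append, List.length_take]; simp; omega),
            List.getElem_append_left (by rw [List.length_take]; omega)]
          rw [List.getElem_take, getElem_diffsB]
        · rw [dif_neg (by omega), dif_pos (by omega)]
          rw [List.getElem_append_left (by rw [List.length_append, List.length_take]; simp; omega),
            List.getElem_append_right (by rw [List.length_take]; omega)]
          have : j - (List.take (k-1) (diffsB xs)).length = 0 := by rw [List.length_take]; omega
          simp only [this, List.getElem_singleton]
          rw [hgd1, hgd2]
          have ek : k = j + 1 := by omega
          subst ek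
          simp only [Nat.add_sub_cancel]
          ring
        · rw [dif_neg (by omega), dif_neg (by omega)]
          rw [List.getElem_append_right (by rw [List.length_append, List.length_take]; simp; omega)]
          rw [List.getElem_drop, getElem_diffsB]
          congr 2 <;> · rw [List.length_append, List.length_take, List.length_singleton]; omega

-- a removal away from the first bad step keeps that bad step
theorem mem_restOf (d : List Int) (i k : Nat)
    (hk : k ≤ d.length) (h1 : k ≠ i) (h2 : k ≠ i + 1)
    (hi' : i < d.length) : d[i] ∈ restOf d k := by
  unfold restOf
  by_cases hk0 : k = 0
  · subst hk0
    rw [if_pos rfl]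
    have e : (d.drop 1)[i - 1]'(by simp; omega) = d[i] := by
      rw [List.getElem_drop]; congr 1; omega
    exact e ▸ List.getElem_mem _
  · rw [if_neg hk0]
    by_cases hkm : k = d.length
    · rw [if_pos hkm]
      have hi2 : i < d.length - 1 := by omega
      have e : (d.dropLast)[i]'(by simp [List.length_dropLast]; omega) = d[i] := by
        rw [List.getElem_dropLast]
      exact e ▸ List.getElem_mem _
    · rw [if_neg hkm]
      rcases (by omega : i < k - 1 ∨ k + 1 ≤ i) with hc | hc
      · apply List.mem_append_left
        apply List.mem_append_left
        have e : (d.take (k-1))[i]'(by simp [List.length_take]; omega) = d[i] := by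
          rw [List.getElem_take]
        exact e ▸ List.getElem_mem _
      · apply List.mem_append_right
        have e : (d.drop (k+1))[i - (k+1)]'(by simp; omega) = d[i] := by
          rw [List.getElem_drop]; congr 1; omega
        exact e ▸ List.getElem_mem _

theorem tolerantB_char (lo hi : Int) (d : List Int) :
    tolerantB d lo hi = true ↔
      (allP lo hi d = true ∨ ∃ k ≤ d.length, allP lo hi (restOf d k) = true) := by
  unfold tolerantB
  rcases hfb : firstBad lo hi d with _ | i
  · simp [(firstBad_eq_none_iff lo hi d).1 hfb]
  · obtain ⟨hilt, hbad⟩ := firstBad_eq_some lo hi d i hfb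
    have hnall : ¬ allP lo hi d = true := by
      intro hall
      have h' : ∀ z ∈ d, lo ≤ z ∧ z ≤ hi := by simpa [allP, List.all_eq_true] using hall
      exact hbad (h' _ (List.getElem_mem hilt))
    simp only [Bool.or_eq_true, okWithoutLevel_eq, beq_iff_eq, firstBad_eq_none_iff]
    constructor
    · rintro (h | h)
      · exact Or.inr ⟨i, by omega, h⟩
      · exact Or.inr ⟨i + 1, by omega, h⟩
    · rintro (h | ⟨k, hkle, hok⟩)
      · exact absurd h hnall
      · by_cases hki : k = i
        · subst hki; exact Or.inl hok
        · by_cases hki1 : k = i + 1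
          · subst hki1; exact Or.inr hok
          · exfalso
            have hmem := mem_restOf d i k hkle hki hki1 hilt
            have h' : ∀ z ∈ restOf d k, lo ≤ z ∧ z ≤ hi := by
              simpa [allP, List.all_eq_true] using hok
            exact hbad (h' _ hmem)

-- abbreviation used only to state the characterisations
def safeLvl (ys : List Int) : Bool := allP 1 3 (diffsB ys) || allP (-3) (-1) (diffsB ys)

theorem alt_char (xs : List Int) (h2 : 2 ≤ xs.length) :
    is_safe2_alt xs = true ↔
      (safeLvl xs = true ∨ ∃ k < xs.length, safeLvl (rmv xs k) = true) := by
  have hld : (diffsB xs).length = xs.length - 1 := length_diffsB xs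
  unfold is_safe2_alt
  simp only [Bool.or_eq_true, tolerantB_char, safeLvl]
  constructor
  · rintro (h | h) <;> rcases h with h | ⟨k, hk, h⟩
    · exact Or.inl (by simp [h])
    · exact Or.inr ⟨k, by omega, by rw [diffsB_rmv xs k h2 (by omega)]; simp [h]⟩
    · exact Or.inl (by simp [h])
    · exact Or.inr ⟨k, by omega, by rw [diffsB_rmv xs k h2 (by omega)]; simp [h]⟩
  · rintro (h | ⟨k, hk, h⟩)
    · rcases h with h' | h'
      · exact Or.inl (Or.inl h')
      · exact Or.inr (Or.inl h')
    · rw [diffsB_rmv xs k h2 hk] at h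
      rcases h with h' | h'
      · exact Or.inl (Or.inr ⟨k, by omega, h'⟩)
      · exact Or.inr (Or.inr ⟨k, by omega, h'⟩)

theorem rmv_last (xs : List Int) : rmv xs (xs.length - 1) = xs.dropLast := by
  rcases xs with _ | ⟨a, t⟩
  · simp [rmv]
  · simp only [rmv, List.length_cons, Nat.add_sub_cancel]
    rw [List.dropLast_eq_take]
    have : (a :: t).drop (t.length + 1) = [] := by
      apply List.drop_eq_nil_of_le; simp
    simp [this]

theorem a_char (xs : List Int) (h3 : 3 ≤ xs.length) :
    is_safe2 xs = true ↔
      (safeLvl xs = true ∨ ∃ k < xs.length, safeLvl (rmv xs k) = true) := by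
  unfold is_safe2
  rw [safeA_char xs (by omega)]
  rw [PySem.List.foldl_if_true_eq
    (p := fun i => is_safeA (PySem.List.slice xs none (some i) ++
      PySem.List.slice xs (some (i + 1)) none) == some true)]
  have hcand : ∀ i ∈ PySem.List.pyRange 0 (PySem.List.len xs - 1) 1,
      PySem.List.slice xs none (some i) ++ PySem.List.slice xs (some (i + 1)) none
        = rmv xs i.toNat ∧ i.toNat < xs.length - 1 := by
    intro i hi
    rw [PySem.List.mem_pyRange_one] at hi
    obtain ⟨hi0, hi1⟩ := hi
    have hlen : (PySem.List.len xs : Int) = (xs.length : Int) := by simp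
    constructor
    · rw [PySem.List.slice_to xs hi0, PySem.List.slice_from xs (by omega)]
      have : (i + 1).toNat = i.toNat + 1 := by omega
      rw [this, rmv]
    · rw [hlen] at hi1; omega
  have hlast : PySem.List.slice xs none (some (-1)) = rmv xs (xs.length - 1) := by
    rw [PySem.List.slice_to_neg_one, rmv_last]
  rw [hlast]
  by_cases hsafe : safeLvl xs = true
  · simp only [safeLvl] at hsafe
    simp [hsafe]
    exact Or.inl (by simpa [safeLvl] using hsafe)
  · have hfalse : (allP 1 3 (diffsB xs) || allP (-3) (-1) (diffsB xs)) = false := by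
      simpa [safeLvl] using hsafe
    rw [hfalse]
    simp only [beq_iff_eq, Option.some_inj, Bool.false_eq_true, if_false, Bool.false_or]
    constructor
    · intro h
      split_ifs at h with hl
      · -- last removal safe
        rw [safeA_char _ (by rw [length_rmv xs _ (by omega)]; omega)] at hl
        simp only [Option.some_inj] at hl
        exact Or.inr ⟨xs.length - 1, by omega, by simpa [safeLvl] using hl⟩
      · -- from the loop
        rw [List.any_eq_true] at h
        obtain ⟨i, hi, hp⟩ := h
        obtain ⟨he, hlt⟩ := hcand i hi
        rw [he, safeA_char _ (by rw [length_rmv xs _ (by omega)]; omega)] at hp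
        simp only [beq_iff_eq, Option.some_inj] at hp
        exact Or.inr ⟨i.toNat, by omega, by simpa [safeLvl] using hp⟩
    · rintro (h | ⟨k, hk, h⟩)
      · exact absurd h hsafe
      · by_cases hkl : k = xs.length - 1
        · subst hkl
          rw [if_pos]
          rw [safeA_char _ (by rw [length_rmv xs _ (by omega)]; omega)]
          simp only [Option.some_inj]
          simpa [safeLvl] using h
        · have hany : ((PySem.List.pyRange 0 (PySem.List.len xs - 1) 1).any fun i =>
              is_safeA (PySem.List.slice xs none (some i) ++
                PySem.List.slice xs (some (i + 1)) none) == some true) = true := by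
            rw [List.any_eq_true]
            refine ⟨(k : Int), ?_, ?_⟩
            · rw [PySem.List.mem_pyRange_one]
              constructor
              · omega
              · have : (PySem.List.len xs : Int) = (xs.length : Int) := by simp
                rw [this]; omega
            · obtain ⟨he, _⟩ := hcand (k : Int) (by
                rw [PySem.List.mem_pyRange_one]
                constructor
                · omega
                · have : (PySem.List.len xs : Int) = (xs.length : Int) := by simp
                  rw [this]; omega)
              rw [he]
              have : ((k : Int)).toNat = k := by omega
              rw [this, safeA_char _ (by rw [length_rmv xs _ (by omega)]; omega)]
              simp only [beq_iff_eq, Option.some_inj]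
              simpa [safeLvl] using h
          split_ifs with hl
          · rfl
          · exact hany

theorem tolerantB_single (x lo hi : Int) : tolerantB [x] lo hi = true := by
  unfold tolerantB firstBad
  by_cases h : lo ≤ x ∧ x ≤ hi
  · simp [h, firstBad]
  · simp [h, okWithoutLevel, firstBad]

-- ===== VERDICT (by name: the statement is the Claim_ definition above) =====
theorem is_safe2_spec : Claim_equal_is_safe2 := by
  intro levels _ hpre
  unfold Spec_is_safe2
  rcases hpre with h3 | ⟨h2, hlo, hhi⟩
  · rw [Bool.eq_iff_iff, a_char levels h3, ← alt_char levels (by omega)]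
  · -- two levels with a safe step: both sides are true
    obtain ⟨a, b, rfl⟩ : ∃ a b, levels = [a, b] := by
      rcases levels with _ | ⟨a, _ | ⟨b, _ | ⟨c, t⟩⟩⟩
      · simp at h2
      · simp at h2
      · exact ⟨a, b, rfl⟩
      · simp at h2
    have hd : [a, b].getD 1 0 - [a, b].getD 0 0 = b - a := rfl
    rw [hd] at hlo hhi
    have hsafe : safeLvl [a, b] = true := by
      simp only [safeLvl, allP, diffsB]
      rcases abs_cases (b - a) with ⟨e1, e2⟩ | ⟨e1, e2⟩ <;> simp <;> omega
    have ha : is_safe2 [a, b] = true := by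
      unfold is_safe2
      rw [safeA_char _ (by simp)]
      simp only [beq_iff_eq, Option.some_inj]
      rw [show (allP 1 3 (diffsB [a, b]) || allP (-3) (-1) (diffsB [a, b])) = safeLvl [a, b] from rfl,
        hsafe]
      simp
    have hb : is_safe2_alt [a, b] = true := by
      unfold is_safe2_alt
      have : diffsB [a, b] = [b - a] := by simp [diffsB]
      rw [this, tolerantB_single, tolerantB_single]
      simp
    rw [ha, hb]

theorem is_safe2_raises : Claim_raises_is_safe2 := by
  unfold Claim_raises_is_safe2
  constructor
  · intro levels _ hr hp
    unfold Raises_is_safe2 at hr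
    unfold Pre_is_safe2 at hp
    rcases hr with hr | ⟨hr2, hrc⟩ <;> rcases hp with hp | ⟨hp2, hpc⟩
    · omega
    · omega
    · omega
    · exact hrc ⟨hpc.1, hpc.2⟩
  · refine ⟨by decide, by decide, by decide⟩

-- self-check: the raise witness is inside Raises_ and B returns the stated value there
theorem pvRaiseWitness_ok :
    Raises_is_safe2 pvRaiseWitness_is_safe2 ∧
      is_safe2_alt pvRaiseWitness_is_safe2 = pvRaiseWitnessOut_is_safe2 :=
  is_safe2_raises.2.2
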